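-- pv_equiv track=rewrite | github.com/MicroTechSolution/Python-ChatBot- | responce.py | badFilter
-- ===== SOURCE A (Python) =====
-- def badFilter(theInfo):
--     badWords = ["fuck", "fucker", "bhosdicha", "madarchod","yz","chutiya","gandu","mc","bc","ag","ass", "bhosda", "dlp","DLP"]
--     gotWord = False
--     for i in range(0,len(badWords)):
--         temp = theInfo.find(badWords[i])
--         if temp == -1:
--             continue
--         else:
--             gotWord = True
--
--     if gotWord == True:
--         return "feels bad because you are expecting bad word from me"
--     else:
--         return theInfo
-- ===== SOURCE B (Python) =====
-- def badFilter(theInfo):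
--     badWords = ["fuck", "fucker", "bhosdicha", "madarchod","yz","chutiya","gandu","mc","bc","ag","ass", "bhosda", "dlp","DLP"]
--     byFirst = {}
--     for w in badWords:
--         byFirst.setdefault(w[0], []).append(w)
--     for i, c in enumerate(theInfo):
--         for w in byFirst.get(c, []):
--             if theInfo.startswith(w, i):
--                 return "feels bad because you are expecting bad word from me"
--     return theInfo
-- ===== Notes on version B (the rewrite author's own statement) =====
-- stated objective: alternative
-- what changed: Replaces A's per-word full-text str.find scans with a first-character hash index (dict of first letter -> candidate words) and one left-to-right scan of the text that checks startswith only for words whose first letter matches the current character.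
import Mathlib
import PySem

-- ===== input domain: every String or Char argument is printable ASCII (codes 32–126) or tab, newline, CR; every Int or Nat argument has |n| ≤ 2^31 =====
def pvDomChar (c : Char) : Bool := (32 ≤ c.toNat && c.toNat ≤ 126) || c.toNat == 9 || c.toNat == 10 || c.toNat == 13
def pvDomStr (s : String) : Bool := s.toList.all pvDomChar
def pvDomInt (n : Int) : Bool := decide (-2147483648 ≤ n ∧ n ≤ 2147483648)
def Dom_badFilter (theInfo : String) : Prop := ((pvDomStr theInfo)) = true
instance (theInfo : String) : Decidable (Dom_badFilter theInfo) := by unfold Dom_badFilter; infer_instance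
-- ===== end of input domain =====

-- B replaces A's per-word full-text find scans with a first-letter index (dict) and a single
-- left-to-right scan of the text checking startswith only for first-letter candidates (alternative).

def pvBadWords : List String :=
  ["fuck", "fucker", "bhosdicha", "madarchod", "yz", "chutiya", "gandu", "mc", "bc", "ag",
   "ass", "bhosda", "dlp", "DLP"]

-- ===== PORT A =====
-- for i in range(0, len(badWords)): temp = theInfo.find(badWords[i]); if temp == -1: continue else: gotWord = True
def badFilter (theInfo : String) : String :=
  let gotWord :=
    (PySem.List.pyRange 0 (pvBadWords.length) 1).foldl
      (fun gotWord i =>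
        let temp := PySem.Str.find theInfo ((PySem.List.pyGet? pvBadWords i).getD "")
        if temp = -1 then gotWord else true)
      false
  if gotWord = true then "feels bad because you are expecting bad word from me" else theInfo

-- ===== PORT B =====
-- byFirst = {}; for w in badWords: byFirst.setdefault(w[0], []).append(w)
def pvByFirst : PySem.Dict Char (List String) :=
  pvBadWords.foldl
    (fun d w =>
      let c := (PySem.Str.pyGet? w 0).getD ' '   -- w[0]; every bad word is nonempty, so never the default
      d.insert c (d.getD c [] ++ [w]))
    PySem.Dict.empty

-- for i, c in enumerate(theInfo): for w in byFirst.get(c, []): if theInfo.startswith(w, i): return …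
-- theInfo.startswith(w, i) is exactly: w.toList is a prefix of the i-th suffix (c :: rest here).
def pvScan : List Char → Bool
  | [] => false
  | c :: rest =>
    if (pvByFirst.getD c []).any (fun w => w.toList.isPrefixOf (c :: rest)) then true
    else pvScan rest

def badFilter_alt (theInfo : String) : String :=
  if pvScan theInfo.toList then "feels bad because you are expecting bad word from me"
  else theInfo

-- ===== PRECONDITION & SPEC =====
def Spec_badFilter (theInfo : String) (out : String) : Prop := out = badFilter_alt theInfo
instance (theInfo : String) (out : String) : Decidable (Spec_badFilter theInfo out) := by unfold Spec_badFilter; infer_instance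

-- ===== CLAIM (what is proved, stated in full; the proofs are below) =====
def Claim_equal_badFilter : Prop := ∀ (theInfo : String), Dom_badFilter theInfo → Spec_badFilter theInfo (badFilter theInfo)

-- ===== LEMMAS AND PROOFS =====

-- A's loop: the flag sticks at true exactly when some element fails the "not found" test
theorem pv_foldl_sticky {a : Type} (p : a -> Prop) [DecidablePred p] (l : List a) (b : Bool) :
    l.foldl (fun g x => if p x then g else true) b
      = (b || l.any (fun x => decide (Not (p x)))) := by
  induction l generalizing b with
  | nil => simp
  | cons x t ih =>
    simp only [List.foldl_cons, List.any_cons]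
    by_cases h : p x
    · rw [if_pos h, ih]; simp [h]
    · rw [if_neg h, ih]; simp [h]

-- the per-word condition A tests agrees with substring membership
theorem pv_word (s w : List Char) :
    (Not (PySem.Chars.find s w = -1)) ↔ PySem.Chars.isIn w s = true := by
  rw [PySem.Chars.isIn_iff_infix, PySem.Chars.find_eq_neg_one_iff]
  exact not_not

theorem pv_range14 : PySem.List.pyRange 0 (pvBadWords.length) 1
    = [0,1,2,3,4,5,6,7,8,9,10,11,12,13] := by
  simp [pvBadWords, PySem.List.pyRange_one_cons]

-- the first-letter index, evaluated once and for all
theorem pv_byFirst_eq : pvByFirst = PySem.Dict.mk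
    [('f', ["fuck", "fucker"]), ('b', ["bhosdicha", "bc", "bhosda"]), ('m', ["madarchod", "mc"]),
     ('y', ["yz"]), ('c', ["chutiya"]), ('g', ["gandu"]), ('a', ["ag", "ass"]),
     ('d', ["dlp"]), ('D', ["DLP"])] := by decide

-- restricting the prefix test to the first-letter bucket of c loses nothing on a suffix starting with c
theorem pv_bucket (c : Char) (rest : List Char) :
    (pvByFirst.getD c []).any (fun w => w.toList.isPrefixOf (c :: rest))
      = pvBadWords.any (fun w => w.toList.isPrefixOf (c :: rest)) := by
  rw [pv_byFirst_eq]
  simp only [PySem.Dict.getD, PySem.Dict.get?_mk_cons, pvBadWords]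
  split_ifs with h1 h2 h3 h4 h5 h6 h7 h8 h9
  all_goals simp only [beq_iff_eq] at *
  all_goals subst_vars
  all_goals simp_all [List.isPrefixOf, PySem.Dict.get?]

-- substring of a cons: a prefix here, or a substring of the tail
theorem pv_isIn_cons (w : List Char) (c : Char) (rest : List Char) :
    PySem.Chars.isIn w (c :: rest)
      = (w.isPrefixOf (c :: rest) || PySem.Chars.isIn w rest) := by
  rw [Bool.eq_iff_iff]
  simp [PySem.Chars.isIn_iff_infix, List.infix_cons_iff, List.isPrefixOf_iff_prefix]

-- B's scan decides exactly "some bad word occurs as a substring"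
theorem pv_scan_eq (s : List Char) :
    pvScan s = pvBadWords.any (fun w => PySem.Chars.isIn w.toList s) := by
  induction s with
  | nil => simp [pvScan]; decide
  | cons c rest ih =>
    simp only [pvScan]
    rw [pv_bucket]
    by_cases h : pvBadWords.any (fun w => w.toList.isPrefixOf (c :: rest)) = true
    · rw [if_pos h]
      rcases List.any_eq_true.mp h with ⟨w, hw, hp⟩
      symm
      exact List.any_eq_true.mpr ⟨w, hw, by rw [pv_isIn_cons, hp]; simp⟩
    · rw [if_neg h, ih]
      rw [Bool.eq_iff_iff]
      simp only [List.any_eq_true] at *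
      constructor
      · rintro ⟨w, hw, hin⟩
        exact ⟨w, hw, by rw [pv_isIn_cons]; simp [hin]⟩
      · rintro ⟨w, hw, hin⟩
        rw [pv_isIn_cons] at hin
        rcases Bool.or_eq_true_iff.mp hin with hp | hr
        · exact absurd ⟨w, hw, hp⟩ h
        · exact ⟨w, hw, hr⟩

-- ===== VERDICT (by name: the statement is the Claim_ definition above) =====
theorem badFilter_spec : Claim_equal_badFilter := by
  intro theInfo _
  show badFilter theInfo = badFilter_alt theInfo
  simp only [badFilter, badFilter_alt, pv_foldl_sticky, pv_range14, Bool.false_or, pv_scan_eq]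
  simp [pvBadWords, PySem.List.pyGet?, PySem.List.pyIdx?, pv_word]
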